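-- pv_equiv track=rewrite | github.com/welcomefrank/m3u_subscriber | dns.py | stupidThink
-- ===== SOURCE A (Python) =====
-- def stupidThink(domain_name):
--     try:
--         sub_domains = ['.'.join(domain_name.split('.')[i:]) for i in range(len(domain_name.split('.')) - 1)]
--     except Exception as e:
--         return ''
--     # 一级域名,不是顶级域名那种
--     domain = sub_domains[-1]
--     try:
--         for key in ignore_domain:
--             # 一级域名有顶级域名，找二级域名
--             if domain.startswith(key):
--                 try:  # 二级域名仍然可能有顶级域名，但很少
--                     return sub_domains[-2]
--                 except Exception as e:
--                     return domain
--         return domain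
--     except Exception as e:
--         return domain
--
-- ignore_domain = ['com.', 'cn.', 'org.', 'net.', 'edu.', 'gov.', 'mil.', 'int.', 'biz.', 'info.', 'name.', 'pro.',
--                  'asia.', 'us.', 'uk.', 'jp.']
-- ===== SOURCE B (Python) =====
-- ignore_domain = ['com.', 'cn.', 'org.', 'net.', 'edu.', 'gov.', 'mil.', 'int.', 'biz.', 'info.', 'name.', 'pro.',
--                  'asia.', 'us.', 'uk.', 'jp.']
--
--
-- def stupidThink(domain_name):
--     parts = domain_name.split('.')
--     domain = parts[-2] + '.' + parts[-1]
--     if any(domain.startswith(key) for key in ignore_domain):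
--         return '.'.join(parts[-3:])
--     return domain
-- ===== Notes on version B (the rewrite author's own statement) =====
-- stated objective: simpler
-- what changed: B drops A's materialisation of every dotted suffix (the sub_domains list comprehension plus negative indexing with try/except) and instead joins the last two labels directly and, on an ignore_domain match, joins the last three via a slice guarded by any().
import Mathlib
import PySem

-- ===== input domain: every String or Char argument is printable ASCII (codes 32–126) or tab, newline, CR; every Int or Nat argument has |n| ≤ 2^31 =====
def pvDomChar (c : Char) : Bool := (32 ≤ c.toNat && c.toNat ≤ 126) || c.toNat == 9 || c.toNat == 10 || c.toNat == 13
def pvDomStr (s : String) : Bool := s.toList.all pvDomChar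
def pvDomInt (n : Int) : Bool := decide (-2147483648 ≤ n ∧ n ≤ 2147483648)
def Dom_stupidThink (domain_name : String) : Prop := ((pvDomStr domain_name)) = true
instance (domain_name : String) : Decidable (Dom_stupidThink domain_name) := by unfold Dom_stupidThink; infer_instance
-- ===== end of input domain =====

-- B replaces A's list of all dotted suffixes (comprehension + negative indexing with
-- try/except) by direct joins of the last two / last three labels: simpler, same values.


-- module constant ignore_domain (shared context of both Pythons)
def pvIgnoreDomain : List String :=
  ["com.", "cn.", "org.", "net.", "edu.", "gov.", "mil.", "int.", "biz.", "info.", "name.", "pro.",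
   "asia.", "us.", "uk.", "jp."]

-- ===== PORT A =====
-- 'for key in ignore_domain: if domain.startswith(key): return sub_domains[-2] (IndexError caught → domain)'
def stupidThinkLoop (sub_domains : List String) (domain : String) : List String → String
  | [] => domain
  | key :: rest =>
    if PySem.Str.startswith domain key then (PySem.List.pyGet? sub_domains (-2)).getD domain
    else stupidThinkLoop sub_domains domain rest

def stupidThink (domain_name : String) : String :=
  let parts := (PySem.Str.split? domain_name ".").getD []   -- sep "." ≠ "": split? is some
  let sub_domains := (PySem.List.pyRange 0 ((parts.length : Int) - 1) 1).map
    (fun i => PySem.Str.join "." (PySem.List.slice parts (some i) none))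
  -- 'domain = sub_domains[-1]' raises IndexError when parts has < 2 labels: outside Pre_
  let domain := (PySem.List.pyGet? sub_domains (-1)).getD ""
  stupidThinkLoop sub_domains domain pvIgnoreDomain

-- ===== PORT B =====
def stupidThink_alt (domain_name : String) : String :=
  let parts := (PySem.Str.split? domain_name ".").getD []
  -- 'parts[-2] + "." + parts[-1]' raises IndexError when parts has < 2 labels: outside Pre_
  let domain := ((PySem.List.pyGet? parts (-2)).getD "") ++ "." ++ ((PySem.List.pyGet? parts (-1)).getD "")
  if pvIgnoreDomain.any (fun key => PySem.Str.startswith domain key) then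
    PySem.Str.join "." (PySem.List.slice parts (some (-3)) none)
  else domain

-- ===== PRECONDITION & SPEC =====
-- Pre_ holds exactly when domain_name contains at least one dot, i.e. splitting on dots gives ≥ 2 pieces;
-- on dot-free inputs BOTH Pythons raise an uncaught IndexError (A on sub_domains[-1], B on parts[-2]).
def Pre_stupidThink (domain_name : String) : Prop :=
  2 ≤ ((PySem.Str.split? domain_name ".").getD []).length
instance (domain_name : String) : Decidable (Pre_stupidThink domain_name) := by
  unfold Pre_stupidThink; infer_instance

def pvWitness_stupidThink : String := "example.com"

def Spec_stupidThink (domain_name : String) (out : String) : Prop := out = stupidThink_alt domain_name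
instance (domain_name : String) (out : String) : Decidable (Spec_stupidThink domain_name out) := by
  unfold Spec_stupidThink; infer_instance

-- ===== CLAIM (what is proved, stated in full; the proofs are below) =====
def Claim_equal_stupidThink : Prop := ∀ (domain_name : String), Dom_stupidThink domain_name → Pre_stupidThink domain_name → Spec_stupidThink domain_name (stupidThink domain_name)

-- ===== LEMMAS AND PROOFS =====

-- A's key loop returns sub_domains[-2] (default domain) iff some ignore key matches
theorem stupidThinkLoop_eq (subs : List String) (domain : String) (ks : List String) :
    stupidThinkLoop subs domain ks =
      if ks.any (fun k => PySem.Str.startswith domain k) then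
        (PySem.List.pyGet? subs (-2)).getD domain
      else domain := by
  induction ks with
  | nil => simp [stupidThinkLoop]
  | cons k rest ih =>
    rw [stupidThinkLoop, List.any_cons, ih]
    by_cases h : PySem.Str.startswith domain k = true
    · rw [if_pos h, h, Bool.true_or, if_pos rfl]
    · rw [if_neg h]
      simp only [Bool.not_eq_true] at h
      rw [h, Bool.false_or]

theorem join_pair (a b : String) : PySem.Str.join "." [a, b] = a ++ "." ++ b := by
  apply String.toList_inj.mp
  simp [PySem.Str.toList_join, PySem.Chars.join_cons_cons, PySem.Chars.join_singleton]

theorem exists_last_two (ps : List String) (h : 2 ≤ ps.length) :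
    ∃ front a b, ps = front ++ [a, b] := by
  match hr : ps.reverse with
  | [] => simp_all
  | [b] => rw [← ps.reverse_reverse, hr] at h; simp at h
  | b :: a :: r =>
    exact ⟨r.reverse, a, b, by rw [← ps.reverse_reverse, hr]; simp⟩

-- the core equivalence, stated over the split result
theorem core (ps : List String) (h : 2 ≤ ps.length) :
    (stupidThinkLoop
      ((PySem.List.pyRange 0 ((ps.length : Int) - 1) 1).map
        (fun i => PySem.Str.join "." (PySem.List.slice ps (some i) none)))
      ((PySem.List.pyGet? ((PySem.List.pyRange 0 ((ps.length : Int) - 1) 1).map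
        (fun i => PySem.Str.join "." (PySem.List.slice ps (some i) none))) (-1)).getD "")
      pvIgnoreDomain)
    = (if pvIgnoreDomain.any (fun key => PySem.Str.startswith
          (((PySem.List.pyGet? ps (-2)).getD "") ++ "." ++ ((PySem.List.pyGet? ps (-1)).getD "")) key) then
        PySem.Str.join "." (PySem.List.slice ps (some (-3)) none)
      else ((PySem.List.pyGet? ps (-2)).getD "") ++ "." ++ ((PySem.List.pyGet? ps (-1)).getD "")) := by
  obtain ⟨front, a, b, rfl⟩ := exists_last_two ps h
  have hsubs : (PySem.List.pyRange 0 (((front ++ [a, b]).length : Int) - 1) 1).map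
      (fun i => PySem.Str.join "." (PySem.List.slice (front ++ [a, b]) (some i) none)) =
      (List.range (front.length + 1)).map
        (fun k => PySem.Str.join "." ((front ++ [a, b]).drop k)) := by
    rw [PySem.List.pyRange_one, List.map_map]
    have hl : ((((front ++ [a, b]).length : Int) - 1) - 0).toNat = front.length + 1 := by
      simp; omega
    rw [hl]
    refine List.map_congr_left (fun k hk => ?_)
    simp [PySem.List.slice_from_natCast]
  rw [hsubs, stupidThinkLoop_eq]
  have hdom : ((PySem.List.pyGet? ((List.range (front.length + 1)).map
      (fun k => PySem.Str.join "." ((front ++ [a, b]).drop k))) (-1)).getD "")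
      = ((PySem.List.pyGet? (front ++ [a, b]) (-2)).getD "") ++ "." ++
        ((PySem.List.pyGet? (front ++ [a, b]) (-1)).getD "") := by
    rw [PySem.List.pyGet?_neg_one, PySem.List.pyGet?_neg_one,
        PySem.List.pyGet?_neg_ofNat (front ++ [a, b]) 2 (by omega) (by simp)]
    rw [List.range_succ, List.map_append]
    simp [join_pair]
  rw [hdom]
  by_cases hmatch : (pvIgnoreDomain.any fun key => PySem.Str.startswith
      (((PySem.List.pyGet? (front ++ [a, b]) (-2)).getD "") ++ "." ++
        ((PySem.List.pyGet? (front ++ [a, b]) (-1)).getD "")) key) = true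
  · rw [if_pos hmatch, if_pos hmatch]
    rw [PySem.List.slice_from_neg_ofNat (front ++ [a, b]) 3 (by omega)]
    cases front with
    | nil =>
      have hnone : PySem.List.pyGet? ((List.range (([] : List String).length + 1)).map
          (fun k => PySem.Str.join "." ((([] : List String) ++ [a, b]).drop k))) (-2) = none := by
        rw [PySem.List.pyGet?_eq_none_iff]
        simp [PySem.Raise.InRange]
      rw [hnone]
      have h2 : PySem.List.pyGet? [a, b] (-2) = some a := by
        rw [PySem.List.pyGet?_neg_ofNat [a, b] 2 (by omega) (by simp)]; simp
      simp [join_pair, h2, PySem.List.pyGet?_neg_one]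
    | cons f0 front' =>
      have hlen2 : 2 ≤ (((List.range ((f0 :: front').length + 1)).map
          (fun k => PySem.Str.join "." ((f0 :: front' ++ [a, b]).drop k)))).length := by
        simp
      rw [PySem.List.pyGet?_neg_ofNat _ 2 (by omega) hlen2]
      have hidx : ((List.range ((f0 :: front').length + 1)).map
          (fun k => PySem.Str.join "." ((f0 :: front' ++ [a, b]).drop k))).length - 2
          = (f0 :: front').length - 1 := by simp
      rw [hidx]
      rw [List.getElem?_map, List.getElem?_range (by simp)]
      simp
  · rw [if_neg hmatch, if_neg hmatch]

-- ===== VERDICT (by name: the statement is the Claim_ definition above) =====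
theorem stupidThink_spec : Claim_equal_stupidThink := by
  intro d _ hpre
  unfold Spec_stupidThink stupidThink stupidThink_alt
  exact core _ hpre
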